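-- pv_equiv track=rewrite | github.com/ShinsakuOkazaki/DataScience | Assign2-3.py | getMostAndLeastPopulor
-- ===== SOURCE A (Python) =====
-- def getMostAndLeastPopulor(combs_dict):
--     max_value = max(combs_dict.values())
--     min_value = min(combs_dict.values())
--     max_combs = []
--     min_combs = []
--     for k, v in combs_dict.items():
--         if v == max_value:
--             max_combs.append(k)
--         if v == min_value:
--             min_combs.append(k)
--     return max_combs, min_combs
-- ===== SOURCE B (Python) =====
-- def getMostAndLeastPopulor(combs_dict):
--     it = iter(combs_dict.items())
--     k0, v0 = next(it)
--     max_v, max_combs = v0, [k0]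
--     min_v, min_combs = v0, [k0]
--     for k, v in it:
--         if v > max_v:
--             max_v, max_combs = v, [k]
--         elif v == max_v:
--             max_combs.append(k)
--         if v < min_v:
--             min_v, min_combs = v, [k]
--         elif v == min_v:
--             min_combs.append(k)
--     return max_combs, min_combs
-- ===== Notes on version B (the rewrite author's own statement) =====
-- stated objective: alternative
-- what changed: Replaces A's three scans (max of values, min of values, then a collecting loop) by a single pass that maintains running max/min values together with their key lists, resetting a list when a strictly better value appears.
import Mathlib
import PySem

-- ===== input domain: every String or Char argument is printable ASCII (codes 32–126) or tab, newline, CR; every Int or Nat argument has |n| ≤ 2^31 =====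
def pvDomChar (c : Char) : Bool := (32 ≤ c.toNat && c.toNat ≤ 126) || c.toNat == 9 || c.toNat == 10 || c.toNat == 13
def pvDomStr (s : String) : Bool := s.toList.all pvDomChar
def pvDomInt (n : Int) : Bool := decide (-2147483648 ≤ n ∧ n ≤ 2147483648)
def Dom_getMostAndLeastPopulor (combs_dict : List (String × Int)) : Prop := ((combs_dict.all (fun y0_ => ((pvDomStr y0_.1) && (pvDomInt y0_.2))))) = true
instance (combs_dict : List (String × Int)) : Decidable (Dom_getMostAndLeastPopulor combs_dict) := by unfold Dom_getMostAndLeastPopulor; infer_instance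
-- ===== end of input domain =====

-- B replaces A's three scans (max, min, collect) by one pass with running max/min and their key lists (objective: alternative, same O(n) cost).


-- ===== PORT A =====
def getMostAndLeastPopulor (combs_dict : List (String × Int)) : List String × List String :=
  match PySem.List.max? (combs_dict.map Prod.snd) (fun y => y),
        PySem.List.min? (combs_dict.map Prod.snd) (fun y => y) with
  | some max_value, some min_value =>
      combs_dict.foldl (fun acc p =>
        (if p.2 == max_value then acc.1 ++ [p.1] else acc.1,
         if p.2 == min_value then acc.2 ++ [p.1] else acc.2)) ([], [])
  | _, _ => ([], [])   -- max()/min() on an empty sequence raises ValueError: excluded by Pre_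

-- ===== PORT B =====
-- 'if v > max_v: reset; elif v == max_v: append'
def pvStepMax (s : Int × List String) (p : String × Int) : Int × List String :=
  if s.1 < p.2 then (p.2, [p.1])
  else if p.2 == s.1 then (s.1, s.2 ++ [p.1]) else s

def pvStepMin (s : Int × List String) (p : String × Int) : Int × List String :=
  if p.2 < s.1 then (p.2, [p.1])
  else if p.2 == s.1 then (s.1, s.2 ++ [p.1]) else s

def getMostAndLeastPopulor_alt (combs_dict : List (String × Int)) : List String × List String :=
  match combs_dict with
  | [] => ([], [])   -- next(it) raises StopIteration: excluded by Pre_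
  | (k0, v0) :: rest =>
      let s := rest.foldl (fun (st : (Int × List String) × (Int × List String)) p =>
        (pvStepMax st.1 p, pvStepMin st.2 p)) ((v0, [k0]), (v0, [k0]))
      (s.1.2, s.2.2)

-- ===== PRECONDITION & SPEC =====
-- On the empty dict A raises ValueError (max of empty sequence), so it is excluded.
def Pre_getMostAndLeastPopulor (combs_dict : List (String × Int)) : Prop := combs_dict ≠ []
instance (combs_dict : List (String × Int)) : Decidable (Pre_getMostAndLeastPopulor combs_dict) := by unfold Pre_getMostAndLeastPopulor; infer_instance
def pvWitness_getMostAndLeastPopulor : (List (String × Int)) := [("ab", 3), ("cd", 1)]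

def Spec_getMostAndLeastPopulor (combs_dict : List (String × Int)) (out : List String × List String) : Prop := out = getMostAndLeastPopulor_alt combs_dict
instance (combs_dict : List (String × Int)) (out : List String × List String) : Decidable (Spec_getMostAndLeastPopulor combs_dict out) := by unfold Spec_getMostAndLeastPopulor; infer_instance

-- ===== CLAIM (what is proved, stated in full; the proofs are below) =====
def Claim_equal_getMostAndLeastPopulor : Prop := ∀ (combs_dict : List (String × Int)), Dom_getMostAndLeastPopulor combs_dict → Pre_getMostAndLeastPopulor combs_dict → Spec_getMostAndLeastPopulor combs_dict (getMostAndLeastPopulor combs_dict)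

-- ===== LEMMAS AND PROOFS =====

-- invariant of B's running-max accumulator: after the fold it holds the max of all
-- values seen so far and exactly the keys (in order) whose value equals that max
theorem pvMaxInv (xs : List (String × Int)) (k0 : String) (v0 : Int) :
    xs.foldl pvStepMax (v0, [k0]) =
      ((xs.map Prod.snd).foldl max v0,
       (((k0, v0) :: xs).filter
          (fun p => p.2 == (xs.map Prod.snd).foldl max v0)).map Prod.fst) := by
  induction xs using List.reverseRecOn with
  | nil => simp
  | append_singleton l x ih =>
    obtain ⟨k, v⟩ := x
    have hle := PySem.List.le_foldl_max (l.map Prod.snd) v0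
    set V := (l.map Prod.snd).foldl max v0 with hV
    rw [List.foldl_append, ih, List.foldl_cons, List.foldl_nil]
    have hmap : ((l ++ [(k, v)]).map Prod.snd).foldl max v0 = max V v := by
      simp [List.foldl_append, hV]
    rw [hmap, show ((k0, v0) :: (l ++ [(k, v)])) = (((k0, v0) :: l) ++ [(k, v)]) from rfl]
    by_cases h1 : V < v
    · have hmv : max V v = v := by omega
      have hnil : (((k0, v0) :: l).filter (fun p => p.2 == v)) = [] := by
        rw [List.filter_eq_nil_iff]
        intro p hp
        simp only [beq_iff_eq]
        rcases List.mem_cons.mp hp with h | h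
        · subst h; simp only; omega
        · have := hle.2 p.2 (List.mem_map_of_mem h); omega
      rw [hmv, List.filter_append, hnil]
      simp [pvStepMax, h1]
    · have hmv : max V v = V := by omega
      by_cases h2 : v = V
      · subst h2
        rw [hmv, List.filter_append]
        simp [pvStepMax]
      · have hne : ¬ ((v : Int) == V) = true := by simpa using h2
        rw [hmv, List.filter_append]
        simp [pvStepMax, h1, hne]

theorem pvMinInv (xs : List (String × Int)) (k0 : String) (v0 : Int) :
    xs.foldl pvStepMin (v0, [k0]) =
      ((xs.map Prod.snd).foldl min v0,
       (((k0, v0) :: xs).filter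
          (fun p => p.2 == (xs.map Prod.snd).foldl min v0)).map Prod.fst) := by
  induction xs using List.reverseRecOn with
  | nil => simp
  | append_singleton l x ih =>
    obtain ⟨k, v⟩ := x
    have hle := PySem.List.foldl_min_le (l.map Prod.snd) v0
    set V := (l.map Prod.snd).foldl min v0 with hV
    rw [List.foldl_append, ih, List.foldl_cons, List.foldl_nil]
    have hmap : ((l ++ [(k, v)]).map Prod.snd).foldl min v0 = min V v := by
      simp [List.foldl_append, hV]
    rw [hmap, show ((k0, v0) :: (l ++ [(k, v)])) = (((k0, v0) :: l) ++ [(k, v)]) from rfl]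
    by_cases h1 : v < V
    · have hmv : min V v = v := by omega
      have hnil : (((k0, v0) :: l).filter (fun p => p.2 == v)) = [] := by
        rw [List.filter_eq_nil_iff]
        intro p hp
        simp only [beq_iff_eq]
        rcases List.mem_cons.mp hp with h | h
        · subst h; simp only; omega
        · have := hle.2 p.2 (List.mem_map_of_mem h); omega
      rw [hmv, List.filter_append, hnil]
      simp [pvStepMin, h1]
    · have hmv : min V v = V := by omega
      by_cases h2 : v = V
      · subst h2
        rw [hmv, List.filter_append]
        simp [pvStepMin]
      · have hne : ¬ ((v : Int) == V) = true := by simpa using h2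
        rw [hmv, List.filter_append]
        simp [pvStepMin, h1, hne]

-- ===== VERDICT (by name: the statement is the Claim_ definition above) =====
theorem getMostAndLeastPopulor_spec : Claim_equal_getMostAndLeastPopulor := by
  intro combs_dict _ hpre
  unfold Spec_getMostAndLeastPopulor
  match combs_dict with
  | [] => exact absurd rfl hpre
  | (k0, v0) :: xs =>
    unfold getMostAndLeastPopulor getMostAndLeastPopulor_alt
    rw [show ((k0, v0) :: xs).map Prod.snd = v0 :: xs.map Prod.snd from rfl,
        PySem.List.max?_id_cons, PySem.List.min?_id_cons]
    simp only
    rw [PySem.List.foldl_prod_mk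
          (f := fun acc (p : String × Int) =>
            if p.2 == (xs.map Prod.snd).foldl max v0 then acc ++ [p.1] else acc)
          (g := fun acc (p : String × Int) =>
            if p.2 == (xs.map Prod.snd).foldl min v0 then acc ++ [p.1] else acc),
        PySem.List.foldl_prod_mk (f := pvStepMax) (g := pvStepMin),
        pvMaxInv, pvMinInv,
        PySem.List.foldl_append_if (p := fun (p : String × Int) => p.2 == (xs.map Prod.snd).foldl max v0) (f := Prod.fst),
        PySem.List.foldl_append_if (p := fun (p : String × Int) => p.2 == (xs.map Prod.snd).foldl min v0) (f := Prod.fst)]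
    simp
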